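-- pv_equiv track=rewrite | github.com/Rajasekhar1131997/TIP102_Sessions | Unit_4/Week4Session1_SPSV1.py | validate_nft_actions
-- ===== SOURCE A (Python) =====
-- def validate_nft_actions(actions):
--     if not actions:
--         return False
--     if len(actions) < 2:
--         return False
--     balance = 0
--     for action in actions:
--         if action == "add":
--             balance += 1
--         elif action == "remove":
--             if balance == 0:
--                 return False
--             balance -= 1
--         else:
--             return False
--     return balance == 0
-- ===== SOURCE B (Python) =====
-- from itertools import accumulate
--
-- def validate_nft_actions(actions):
--     if len(actions) < 2:
--         return False
--     if any(a not in ("add", "remove") for a in actions):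
--         return False
--     prefixes = list(accumulate(1 if a == "add" else -1 for a in actions))
--     return prefixes[-1] == 0 and all(p >= 0 for p in prefixes)
-- ===== Notes on version B (the rewrite author's own statement) =====
-- stated objective: alternative
-- what changed: Replaces the single early-exit balance loop with a validate-then-tabulate decomposition: a membership check over all actions, a materialized prefix-sum table (itertools.accumulate), and two reductions (last prefix == 0, all prefixes nonnegative).
import Mathlib
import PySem

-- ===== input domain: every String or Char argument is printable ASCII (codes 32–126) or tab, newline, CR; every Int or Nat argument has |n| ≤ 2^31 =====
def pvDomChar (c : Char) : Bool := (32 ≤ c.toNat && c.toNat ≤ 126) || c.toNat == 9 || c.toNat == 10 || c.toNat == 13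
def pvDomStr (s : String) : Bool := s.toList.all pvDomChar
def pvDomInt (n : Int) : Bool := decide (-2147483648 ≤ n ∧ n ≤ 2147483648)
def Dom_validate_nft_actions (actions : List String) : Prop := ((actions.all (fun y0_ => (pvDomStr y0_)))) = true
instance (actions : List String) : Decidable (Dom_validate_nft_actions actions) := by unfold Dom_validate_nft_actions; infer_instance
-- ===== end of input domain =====

-- B replaces A's early-exit balance loop with validate-then-tabulate: membership check, prefix-sum table, two reductions.


-- ===== PORT A =====
-- the for-loop with early returns, as structural recursion over the balance
def pvGoA (bal : Int) : List String → Bool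
  | [] => bal == 0
  | a :: rest =>
    if a == "add" then pvGoA (bal + 1) rest
    else if a == "remove" then
      (if bal == 0 then false else pvGoA (bal - 1) rest)
    else false

def validate_nft_actions (actions : List String) : Bool :=
  if actions.isEmpty then false
  else if actions.length < 2 then false
  else pvGoA 0 actions

-- ===== PORT B =====
-- itertools.accumulate (no initial value)
def pvAccum (bal : Int) : List Int → List Int
  | [] => []
  | s :: rest => (bal + s) :: pvAccum (bal + s) rest

def validate_nft_actions_alt (actions : List String) : Bool :=
  if actions.length < 2 then false
  else if actions.any (fun a => !(a == "add" || a == "remove")) then false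
  else
    let prefixes := pvAccum 0 (actions.map (fun a => if a == "add" then (1 : Int) else -1))
    -- prefixes[-1]: prefixes is nonempty here (length ≥ 2), so getLastD's default is never used
    (prefixes.getLastD 0 == 0) && prefixes.all (fun p => decide (0 ≤ p))

-- ===== PRECONDITION & SPEC =====
def Spec_validate_nft_actions (actions : List String) (out : Bool) : Prop := out = validate_nft_actions_alt actions
instance (actions : List String) (out : Bool) : Decidable (Spec_validate_nft_actions actions out) := by unfold Spec_validate_nft_actions; infer_instance

-- ===== CLAIM (what is proved, stated in full; the proofs are below) =====
def Claim_equal_validate_nft_actions : Prop := ∀ (actions : List String), Dom_validate_nft_actions actions → Spec_validate_nft_actions actions (validate_nft_actions actions)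

-- ===== LEMMAS AND PROOFS =====

-- an invalid action anywhere makes A's loop return false
lemma pvGoA_invalid (l : List String) (bal : Int)
    (h : ∃ a ∈ l, a ≠ "add" ∧ a ≠ "remove") : pvGoA bal l = false := by
  induction l generalizing bal with
  | nil => rcases h with ⟨a, ha, _⟩; cases ha
  | cons a rest ih =>
    rcases h with ⟨b, hb, hb1, hb2⟩
    simp only [pvGoA]
    by_cases hadd : a = "add"
    · subst hadd
      have hbr : b ∈ rest := by
        rcases List.mem_cons.mp hb with h | h
        · exact absurd h hb1
        · exact h
      simp only [beq_self_eq_true, if_true]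
      exact ih _ ⟨b, hbr, hb1, hb2⟩
    · by_cases hrem : a = "remove"
      · subst hrem
        have hbr : b ∈ rest := by
          rcases List.mem_cons.mp hb with h | h
          · exact absurd h hb2
          · exact h
        by_cases hz : bal = 0 <;> simp [hz, ih _ ⟨b, hbr, hb1, hb2⟩]
      · simp [hadd, hrem]

-- on all-valid input with nonnegative balance, A's loop equals B's two reductions over the prefix table
lemma pvGoA_eq_accum (l : List String) (bal : Int) (hbal : 0 ≤ bal)
    (h : ∀ a ∈ l, a = "add" ∨ a = "remove") :
    pvGoA bal l =
      (((pvAccum bal (l.map (fun a => if a == "add" then (1 : Int) else -1))).getLastD bal == 0)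
        && (pvAccum bal (l.map (fun a => if a == "add" then (1 : Int) else -1))).all
             (fun p => decide (0 ≤ p))) := by
  induction l generalizing bal with
  | nil => simp [pvGoA, pvAccum]
  | cons a rest ih =>
    have hrest : ∀ b ∈ rest, b = "add" ∨ b = "remove" := fun b hb => h b (List.mem_cons_of_mem _ hb)
    rcases h a (List.mem_cons_self) with ha | ha
    · subst ha
      have h1 : (0 : Int) ≤ bal + 1 := by omega
      simp only [pvGoA, pvAccum, List.map_cons, beq_self_eq_true, if_true,
        List.getLastD_cons, List.all_cons]
      rw [ih (bal + 1) h1 hrest]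
      simp [h1]
    · subst ha
      by_cases hz : bal = 0
      · subst hz
        simp [pvGoA, pvAccum]
      · have h1 : (0 : Int) ≤ bal - 1 := by omega
        simp only [pvGoA, pvAccum, List.map_cons]
        rw [if_neg (by decide), if_pos (by decide), if_neg (by simpa using hz)]
        rw [show (("remove" : String) == "add") = false from by decide]
        simp only [Bool.false_eq_true, if_false]
        rw [show bal + (-1 : Int) = bal - 1 from by ring]
        simp only [List.getLastD_cons, List.all_cons]
        rw [ih (bal - 1) h1 hrest]
        simp [show (1 : Int) ≤ bal from by omega]

-- ===== VERDICT (by name: the statement is the Claim_ definition above) =====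
theorem validate_nft_actions_spec : Claim_equal_validate_nft_actions := by
  intro actions _
  unfold Spec_validate_nft_actions validate_nft_actions validate_nft_actions_alt
  by_cases hlen : actions.length < 2
  · have hcase : actions.isEmpty = true ∨ (actions.isEmpty = false ∧ actions.length < 2) := by
      cases actions <;> simp_all
    rcases hcase with h | ⟨h1, h2⟩ <;> simp_all
  · have hne : actions.isEmpty = false := by
      cases actions with
      | nil => simp at hlen
      | cons a l => simp
    simp only [hne, Bool.false_eq_true, if_false, if_neg hlen]
    by_cases hinv : ∃ a ∈ actions, a ≠ "add" ∧ a ≠ "remove"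
    · rw [pvGoA_invalid actions 0 hinv]
      have hany : (actions.any (fun a => !(a == "add" || a == "remove"))) = true := by
        rcases hinv with ⟨a, ha, h1, h2⟩
        exact List.any_eq_true.mpr ⟨a, ha, by simp [h1, h2]⟩
      rw [if_pos hany]
    · push_neg at hinv
      have hval : ∀ a ∈ actions, a = "add" ∨ a = "remove" := by
        intro a ha
        by_cases h1 : a = "add"
        · exact Or.inl h1
        · exact Or.inr (hinv a ha h1)
      have hany : (actions.any (fun a => !(a == "add" || a == "remove"))) = false := by
        simp only [List.any_eq_false]
        intro a ha
        rcases hval a ha with h | h <;> simp [h]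
      have hnot : ¬ ((actions.any (fun a => !(a == "add" || a == "remove"))) = true) := by
        rw [hany]; exact Bool.false_ne_true
      rw [if_neg hnot]
      exact pvGoA_eq_accum actions 0 le_rfl hval
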